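-- pv_equiv track=rewrite | github.com/fredbunz-lgtm/aav-itr-pileup | aav_plasmid_workflow.py | find_palindromic_arms
-- ===== SOURCE A (Python) =====
-- def rc(s):
--     return s.translate(str.maketrans('ACGTNacgtn', 'TGCANtgcan'))[::-1]
--
-- def find_palindromic_arms(itr_seq, min_arm=30, max_arm=44):
--     """Find the longest palindromic arm pair within an ITR sequence."""
--     best_len, best_i, best_j = 0, -1, -1
--     for armlen in range(max_arm, min_arm-1, -1):
--         for i in range(len(itr_seq)-armlen):
--             seg = itr_seq[i:i+armlen]
--             seg_rc = rc(seg)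
--             for j in range(i+armlen+1, len(itr_seq)-armlen+1):
--                 if itr_seq[j:j+armlen] == seg_rc:
--                     if armlen > best_len:
--                         best_len = armlen
--                         best_i = i; best_j = j
--         if best_len >= armlen:
--             break
--     return best_i, best_len, best_j  # arm_a_start, arm_len, arm_b_start
-- ===== SOURCE B (Python) =====
-- def rc(s):
--     return s.translate(str.maketrans('ACGTNacgtn', 'TGCANtgcan'))[::-1]
--
-- def find_palindromic_arms(itr_seq, min_arm=30, max_arm=44):
--     """Find the longest palindromic arm pair within an ITR sequence.
--
--     For each candidate arm length (longest first) build a hash index of all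
--     substrings of that length, then for each left arm look up the positions of
--     its reverse complement and take the first one far enough to the right.
--     """
--     n = len(itr_seq)
--     for armlen in range(max_arm, max(min_arm - 1, 0), -1):
--         index = {}
--         for j in range(n - armlen + 1):
--             index.setdefault(itr_seq[j:j + armlen], []).append(j)
--         for i in range(n - armlen):
--             positions = index.get(rc(itr_seq[i:i + armlen]))
--             if positions:
--                 lo = i + armlen + 1
--                 for j in positions:
--                     if j >= lo:
--                         return i, armlen, j
--     return -1, 0, -1
-- ===== Notes on version B (the rewrite author's own statement) =====
-- stated objective: alternative
-- what changed: Replaces A's brute-force scan over all (left, right) start pairs with a hash index of all length-L substrings built once per arm length, so each left arm looks up the positions of its reverse complement directly; non-positive arm lengths, which can never win, are skipped instead of scanned.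
import Mathlib
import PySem

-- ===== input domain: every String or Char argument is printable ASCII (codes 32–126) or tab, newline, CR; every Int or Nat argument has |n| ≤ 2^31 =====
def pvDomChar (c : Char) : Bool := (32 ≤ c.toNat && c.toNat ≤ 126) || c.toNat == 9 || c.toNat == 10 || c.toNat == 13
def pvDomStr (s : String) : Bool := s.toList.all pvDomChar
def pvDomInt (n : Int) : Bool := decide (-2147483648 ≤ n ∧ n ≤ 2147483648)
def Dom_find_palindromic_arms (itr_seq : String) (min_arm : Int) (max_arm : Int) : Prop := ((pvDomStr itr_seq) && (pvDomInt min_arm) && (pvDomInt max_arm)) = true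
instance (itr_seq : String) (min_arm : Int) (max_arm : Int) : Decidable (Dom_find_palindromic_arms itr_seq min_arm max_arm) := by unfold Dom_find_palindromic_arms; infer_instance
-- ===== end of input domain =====

-- B builds a hash index of all length-L substrings once per arm length instead of A's
-- brute-force scan over all (i, j) pairs: asymptotically faster, same return value.

-- ===== PORT A =====
-- str.maketrans('ACGTNacgtn', 'TGCANtgcan') applied per character; other chars unchanged
def pvTr (c : Char) : Char :=
  if c = 'A' then 'T' else if c = 'C' then 'G' else if c = 'G' then 'C'
  else if c = 'T' then 'A' else if c = 'N' then 'N' else if c = 'a' then 't'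
  else if c = 'c' then 'g' else if c = 'g' then 'c' else if c = 't' then 'a'
  else if c = 'n' then 'n' else c

-- rc(s) = s.translate(...)[::-1]
def pvRC (s : List Char) : List Char := (s.map pvTr).reverse

-- the inner 'for j in range(i+armlen+1, len(itr_seq)-armlen+1)' loop
def pvAInner (cs : List Char) (L i : Int) (segRC : List Char) (b : Int × Int × Int) :
    Int × Int × Int :=
  (PySem.List.pyRange (i + L + 1) ((cs.length : Int) - L + 1) 1).foldl
    (fun b j =>
      if PySem.List.slice cs (some j) (some (j + L)) == segRC then
        (if L > b.1 then (L, i, j) else b)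
      else b) b

-- the 'for i in range(len(itr_seq)-armlen)' loop
def pvAPass (cs : List Char) (L : Int) (b : Int × Int × Int) : Int × Int × Int :=
  (PySem.List.pyRange 0 ((cs.length : Int) - L) 1).foldl
    (fun b i => pvAInner cs L i (pvRC (PySem.List.slice cs (some i) (some (i + L)))) b) b

-- the 'for armlen in range(max_arm, min_arm-1, -1)' loop with its trailing break
def pvALoop (cs : List Char) : List Int → Int × Int × Int → Int × Int × Int
  | [], b => b
  | L :: rest, b =>
    let b' := pvAPass cs L b
    if b'.1 ≥ L then b' else pvALoop cs rest b'

def find_palindromic_arms (itr_seq : String) (min_arm : Int) (max_arm : Int) :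
    Int × Int × Int :=
  let b := pvALoop itr_seq.toList (PySem.List.pyRange max_arm (min_arm - 1) (-1)) (0, -1, -1)
  (b.2.1, b.1, b.2.2)

-- ===== PORT B =====
-- index = {}; for j in range(n-armlen+1): index.setdefault(seq[j:j+armlen], []).append(j)
def pvBIndex (cs : List Char) (L : Int) : PySem.Dict (List Char) (List Int) :=
  (PySem.List.pyRange 0 ((cs.length : Int) - L + 1) 1).foldl
    (fun d j => d.modify (PySem.List.slice cs (some j) (some (j + L))) [] (· ++ [j]))
    PySem.Dict.empty

-- for j in positions: if j >= lo: return …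
def pvBScanJ (lo : Int) : List Int → Option Int
  | [] => none
  | j :: rest => if j ≥ lo then some j else pvBScanJ lo rest

-- for i in range(n-armlen): look up the reverse complement in the index
def pvBScanI (cs : List Char) (L : Int) (index : PySem.Dict (List Char) (List Int)) :
    List Int → Option (Int × Int)
  | [] => none
  | i :: rest =>
    match pvBScanJ (i + L + 1)
        (index.getD (pvRC (PySem.List.slice cs (some i) (some (i + L)))) []) with
    | some j => some (i, j)
    | none => pvBScanI cs L index rest

-- for armlen in range(max_arm, max(min_arm-1, 0), -1): ... (early return on first hit)
def pvBLoop (cs : List Char) : List Int → Int × Int × Int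
  | [] => (-1, 0, -1)
  | L :: rest =>
    match pvBScanI cs L (pvBIndex cs L)
        (PySem.List.pyRange 0 ((cs.length : Int) - L) 1) with
    | some (i, j) => (i, L, j)
    | none => pvBLoop cs rest

def find_palindromic_arms_alt (itr_seq : String) (min_arm : Int) (max_arm : Int) :
    Int × Int × Int :=
  pvBLoop itr_seq.toList (PySem.List.pyRange max_arm (max (min_arm - 1) 0) (-1))

-- ===== PRECONDITION & SPEC =====
def Spec_find_palindromic_arms (itr_seq : String) (min_arm : Int) (max_arm : Int) (out : Int × Int × Int) : Prop := out = find_palindromic_arms_alt itr_seq min_arm max_arm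
instance (itr_seq : String) (min_arm : Int) (max_arm : Int) (out : Int × Int × Int) : Decidable (Spec_find_palindromic_arms itr_seq min_arm max_arm out) := by unfold Spec_find_palindromic_arms; infer_instance

-- ===== CLAIM (what is proved, stated in full; the proofs are below) =====
def Claim_equal_find_palindromic_arms : Prop := ∀ (itr_seq : String) (min_arm : Int) (max_arm : Int), Dom_find_palindromic_arms itr_seq min_arm max_arm → Spec_find_palindromic_arms itr_seq min_arm max_arm (find_palindromic_arms itr_seq min_arm max_arm)

-- ===== LEMMAS AND PROOFS =====

-- proof-side: the first (i, j) pair A's pass for arm length L would record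
def pvAScan (cs : List Char) (L : Int) : List Int → Option (Int × Int)
  | [] => none
  | i :: rest =>
    match (PySem.List.pyRange (i + L + 1) ((cs.length : Int) - L + 1) 1).find?
        (fun j => PySem.List.slice cs (some j) (some (j + L))
                  == pvRC (PySem.List.slice cs (some i) (some (i + L)))) with
    | some j => some (i, j)
    | none => pvAScan cs L rest

-- the loop bodies as named functions (definitionally the lambdas in the ports)
def pvAStep (cs : List Char) (L i : Int) (segRC : List Char) (b : Int × Int × Int) (j : Int) :
    Int × Int × Int :=
  if PySem.List.slice cs (some j) (some (j + L)) == segRC then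
    (if L > b.1 then (L, i, j) else b)
  else b

def pvAIStep (cs : List Char) (L : Int) (b : Int × Int × Int) (i : Int) : Int × Int × Int :=
  pvAInner cs L i (pvRC (PySem.List.slice cs (some i) (some (i + L)))) b

theorem pvAStep_frozen (cs : List Char) (L i : Int) (segRC : List Char) :
    ∀ (jl : List Int) (b : Int × Int × Int), ¬ L > b.1 →
      jl.foldl (pvAStep cs L i segRC) b = b := by
  intro jl
  induction jl with
  | nil => intro b _; rfl
  | cons j rest ih =>
    intro b hb
    rw [List.foldl_cons]
    have hstep : pvAStep cs L i segRC b j = b := by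
      unfold pvAStep; split_ifs <;> simp_all
    rw [hstep]; exact ih b hb

theorem pvAStep_active (cs : List Char) (L i : Int) (segRC : List Char) :
    ∀ (jl : List Int) (b : Int × Int × Int), L > b.1 →
      jl.foldl (pvAStep cs L i segRC) b
      = (match jl.find? (fun j => PySem.List.slice cs (some j) (some (j + L)) == segRC) with
         | some j => (L, i, j)
         | none => b) := by
  intro jl
  induction jl with
  | nil => intro b _; rfl
  | cons j rest ih =>
    intro b hb
    rw [List.foldl_cons, List.find?_cons]
    by_cases hm : (PySem.List.slice cs (some j) (some (j + L)) == segRC) = true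
    · have hstep : pvAStep cs L i segRC b j = (L, i, j) := by
        unfold pvAStep; rw [if_pos hm, if_pos hb]
      rw [hstep, pvAStep_frozen cs L i segRC rest (L, i, j) (by simp), hm]
    · have hstep : pvAStep cs L i segRC b j = b := by
        unfold pvAStep; rw [if_neg hm]
      rw [hstep, ih b hb]
      simp only [Bool.not_eq_true] at hm
      rw [hm]

theorem pvAInner_eq (cs : List Char) (L i : Int) (segRC : List Char) (b : Int × Int × Int) :
    pvAInner cs L i segRC b
    = if L > b.1 then
        (match (PySem.List.pyRange (i + L + 1) ((cs.length : Int) - L + 1) 1).find?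
            (fun j => PySem.List.slice cs (some j) (some (j + L)) == segRC) with
         | some j => (L, i, j)
         | none => b)
      else b := by
  by_cases hb : L > b.1
  · rw [if_pos hb]
    exact pvAStep_active cs L i segRC _ b hb
  · rw [if_neg hb]
    exact pvAStep_frozen cs L i segRC _ b hb

theorem pvAIStep_frozen (cs : List Char) (L : Int) :
    ∀ (il : List Int) (b : Int × Int × Int), ¬ L > b.1 →
      il.foldl (pvAIStep cs L) b = b := by
  intro il
  induction il with
  | nil => intro b _; rfl
  | cons i rest ih =>
    intro b hb
    rw [List.foldl_cons]
    have hstep : pvAIStep cs L b i = b := by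
      unfold pvAIStep; rw [pvAInner_eq, if_neg hb]
    rw [hstep]; exact ih b hb

theorem pvAIStep_active (cs : List Char) (L : Int) :
    ∀ (il : List Int) (b : Int × Int × Int), L > b.1 →
      il.foldl (pvAIStep cs L) b
      = (match pvAScan cs L il with
         | some (i, j) => (L, i, j)
         | none => b) := by
  intro il
  induction il with
  | nil => intro b _; rfl
  | cons i rest ih =>
    intro b hb
    rw [List.foldl_cons]
    unfold pvAScan
    cases hfind : (PySem.List.pyRange (i + L + 1) ((cs.length : Int) - L + 1) 1).find?
        (fun j => PySem.List.slice cs (some j) (some (j + L))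
                  == pvRC (PySem.List.slice cs (some i) (some (i + L)))) with
    | some j =>
      have hstep : pvAIStep cs L b i = (L, i, j) := by
        unfold pvAIStep; rw [pvAInner_eq, if_pos hb, hfind]
      rw [hstep, pvAIStep_frozen cs L rest (L, i, j) (by simp)]
    | none =>
      have hstep : pvAIStep cs L b i = b := by
        unfold pvAIStep; rw [pvAInner_eq, if_pos hb, hfind]
      rw [hstep, ih b hb]

theorem pvAPass_frozen (cs : List Char) (L : Int) (b : Int × Int × Int)
    (hb : ¬ L > b.1) : pvAPass cs L b = b :=
  pvAIStep_frozen cs L _ b hb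

theorem pvAPass_some (cs : List Char) (L i j : Int) (b : Int × Int × Int)
    (hscan : pvAScan cs L (PySem.List.pyRange 0 ((cs.length : Int) - L) 1) = some (i, j))
    (hb : L > b.1) : pvAPass cs L b = (L, i, j) := by
  have h := pvAIStep_active cs L (PySem.List.pyRange 0 ((cs.length : Int) - L) 1) b hb
  rw [hscan] at h
  exact h

theorem pvAPass_none (cs : List Char) (L : Int) (b : Int × Int × Int)
    (hscan : pvAScan cs L (PySem.List.pyRange 0 ((cs.length : Int) - L) 1) = none)
    (hb : L > b.1) : pvAPass cs L b = b := by
  have h := pvAIStep_active cs L (PySem.List.pyRange 0 ((cs.length : Int) - L) 1) b hb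
  rw [hscan] at h
  exact h

theorem pvBIndex_getD (cs : List Char) (L : Int) (key : List Char) :
    (pvBIndex cs L).getD key [] =
      (PySem.List.pyRange 0 ((cs.length : Int) - L + 1) 1).filter
        (fun j => PySem.List.slice cs (some j) (some (j + L)) == key) := by
  have h := PySem.Dict.getD_foldl_modify_append
      (l := (PySem.List.pyRange 0 ((cs.length : Int) - L + 1) 1).map
              (fun j => (PySem.List.slice cs (some j) (some (j + L)), j)))
      (d := (PySem.Dict.empty : PySem.Dict (List Char) (List Int))) (c := key)
  rw [List.foldl_map] at h
  unfold pvBIndex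
  rw [h]
  simp [List.filter_map, Function.comp_def]

theorem pvBScanJ_eq_find? (lo : Int) (l : List Int) :
    pvBScanJ lo l = l.find? (fun j => lo ≤ j) := by
  induction l with
  | nil => rfl
  | cons j rest ih =>
    rw [List.find?_cons]
    unfold pvBScanJ
    by_cases h : lo ≤ j
    · simp [h]
    · simp [h, ih]

-- find? with a predicate every element satisfies returns the head
theorem pvFindAll (lo : Int) (l : List Int) (h : ∀ x ∈ l, lo ≤ x) :
    l.find? (fun j => lo ≤ j) = l.head? := by
  cases l with
  | nil => rfl
  | cons x t =>
    have hx : lo ≤ x := h x (by simp)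
    simp [hx]

-- per-left-arm: the index lookup + position scan finds exactly A's inner-loop first match
theorem pvLookup_eq (cs : List Char) (L i : Int) (hi : 0 ≤ i) (hL : 0 ≤ L) :
    pvBScanJ (i + L + 1)
        ((pvBIndex cs L).getD (pvRC (PySem.List.slice cs (some i) (some (i + L)))) [])
      = (PySem.List.pyRange (i + L + 1) ((cs.length : Int) - L + 1) 1).find?
          (fun j => PySem.List.slice cs (some j) (some (j + L))
                    == pvRC (PySem.List.slice cs (some i) (some (i + L)))) := by
  rw [pvBScanJ_eq_find?, pvBIndex_getD]
  by_cases hc : i + L + 1 ≤ (cs.length : Int) - L + 1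
  · rw [PySem.List.pyRange_one_append 0 (i + L + 1) ((cs.length : Int) - L + 1) (by omega) hc,
        List.filter_append, List.find?_append]
    have h1 : (((PySem.List.pyRange 0 (i + L + 1) 1).filter
        (fun j => PySem.List.slice cs (some j) (some (j + L))
                  == pvRC (PySem.List.slice cs (some i) (some (i + L))))).find?
        (fun j => i + L + 1 ≤ j)) = none := by
      rw [List.find?_eq_none]
      intro j hj
      have hm := PySem.List.mem_pyRange_one.mp (List.mem_of_mem_filter hj)
      simp only [decide_eq_true_eq]
      omega
    rw [h1, Option.none_or]
    rw [pvFindAll _ _ (fun x hx => ?_), List.head?_filter]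
    have hm := PySem.List.mem_pyRange_one.mp (List.mem_of_mem_filter hx)
    omega
  · rw [PySem.List.pyRange_one_eq_nil (a := i + L + 1)
        (b := (cs.length : Int) - L + 1) (by omega), List.find?_nil, List.find?_eq_none]
    intro j hj
    have hm := PySem.List.mem_pyRange_one.mp (List.mem_of_mem_filter hj)
    simp only [decide_eq_true_eq]
    omega

theorem pvBScanI_eq (cs : List Char) (L : Int) (hL : 0 ≤ L) :
    ∀ (il : List Int), (∀ i ∈ il, 0 ≤ i) →
      pvBScanI cs L (pvBIndex cs L) il = pvAScan cs L il := by
  intro il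
  induction il with
  | nil => intro _; rfl
  | cons i rest ih =>
    intro h
    unfold pvBScanI pvAScan
    rw [pvLookup_eq cs L i (h i (by simp)) hL]
    cases hfind : (PySem.List.pyRange (i + L + 1) ((cs.length : Int) - L + 1) 1).find?
        (fun j => PySem.List.slice cs (some j) (some (j + L))
                  == pvRC (PySem.List.slice cs (some i) (some (i + L)))) with
    | some j => rfl
    | none => exact ih (fun x hx => h x (List.mem_cons_of_mem _ hx))

theorem pvLoop_eq (cs : List Char) (mn : Int) :
    ∀ (k : Nat) (L : Int), L.toNat ≤ k →
      (let b := pvALoop cs (PySem.List.pyRange L (mn - 1) (-1)) (0, -1, -1)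
       ((b.2.1, b.1, b.2.2) : Int × Int × Int))
      = pvBLoop cs (PySem.List.pyRange L (max (mn - 1) 0) (-1)) := by
  intro k
  induction k with
  | zero =>
    intro L hk
    have hL0 : L ≤ 0 := by omega
    by_cases h1 : L ≤ mn - 1
    · rw [PySem.List.pyRange_neg_one_eq_nil h1,
          PySem.List.pyRange_neg_one_eq_nil (show L ≤ max (mn - 1) 0 by omega)]
      rfl
    · rw [PySem.List.pyRange_neg_one_cons (by omega),
          PySem.List.pyRange_neg_one_eq_nil (show L ≤ max (mn - 1) 0 by omega)]
      simp only [pvALoop, pvBLoop]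
      rw [pvAPass_frozen cs L _ (by simp; omega)]
      rw [if_pos (show ((0 : Int), (-1 : Int), (-1 : Int)).1 ≥ L by simp; omega)]
  | succ k ih =>
    intro L hk
    by_cases h1 : L ≤ mn - 1
    · rw [PySem.List.pyRange_neg_one_eq_nil h1,
          PySem.List.pyRange_neg_one_eq_nil (show L ≤ max (mn - 1) 0 by omega)]
      rfl
    · by_cases h2 : L ≤ 0
      · rw [PySem.List.pyRange_neg_one_cons (by omega),
            PySem.List.pyRange_neg_one_eq_nil (show L ≤ max (mn - 1) 0 by omega)]
        simp only [pvALoop, pvBLoop]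
        rw [pvAPass_frozen cs L _ (by simp; omega)]
        rw [if_pos (show ((0 : Int), (-1 : Int), (-1 : Int)).1 ≥ L by simp; omega)]
      · rw [PySem.List.pyRange_neg_one_cons (by omega : mn - 1 < L),
            PySem.List.pyRange_neg_one_cons (show max (mn - 1) 0 < L by omega)]
        simp only [pvALoop, pvBLoop]
        rw [pvBScanI_eq cs L (by omega) _
            (fun x hx => (PySem.List.mem_pyRange_one.mp hx).1)]
        cases hscan : pvAScan cs L (PySem.List.pyRange 0 ((cs.length : Int) - L) 1) with
        | some p =>
          obtain ⟨i, j⟩ := p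
          rw [pvAPass_some cs L i j _ hscan (by simp; omega)]
          rw [if_pos (show ((L, i, j) : Int × Int × Int).1 ≥ L from le_refl L)]
        | none =>
          rw [pvAPass_none cs L _ hscan (by simp; omega)]
          rw [if_neg (show ¬ ((0 : Int), (-1 : Int), (-1 : Int)).1 ≥ L by simp; omega)]
          exact ih (L - 1) (by omega)

-- ===== VERDICT (by name: the statement is the Claim_ definition above) =====
theorem find_palindromic_arms_spec : Claim_equal_find_palindromic_arms := by
  intro s mn mx _
  unfold Spec_find_palindromic_arms find_palindromic_arms find_palindromic_arms_alt
  exact pvLoop_eq s.toList mn mx.toNat mx le_rfl
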